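-- pv_equiv track=rewrite | github.com/gjcasanova/IEEEXtreme_Practice_Tasks | Rumour/Rumour.py | solve
-- ===== SOURCE A (Python) =====
-- def solve(pair):
--     node_a, node_b = pair
--     result = 0
--     while node_a != node_b:
--         if node_a > node_b:
--             node_a //= 2
--         else:
--             node_b //= 2
--         result += 1
--     return result
-- ===== SOURCE B (Python) =====
-- def solve(pair):
--     a, b = pair
--     da, db = a.bit_length(), b.bit_length()
--     result = abs(da - db)
--     for _ in range(da - db):
--         a //= 2
--     for _ in range(db - da):
--         b //= 2
--     while a != b:
--         a //= 2
--         b //= 2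
--         result += 2
--     return result
-- ===== Notes on version B (the rewrite author's own statement) =====
-- stated objective: alternative
-- what changed: Instead of repeatedly comparing magnitudes and halving the larger node, B computes both depths via bit_length, halves the deeper node by the depth difference, then ascends both nodes in lockstep adding 2 per step.
import Mathlib
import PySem

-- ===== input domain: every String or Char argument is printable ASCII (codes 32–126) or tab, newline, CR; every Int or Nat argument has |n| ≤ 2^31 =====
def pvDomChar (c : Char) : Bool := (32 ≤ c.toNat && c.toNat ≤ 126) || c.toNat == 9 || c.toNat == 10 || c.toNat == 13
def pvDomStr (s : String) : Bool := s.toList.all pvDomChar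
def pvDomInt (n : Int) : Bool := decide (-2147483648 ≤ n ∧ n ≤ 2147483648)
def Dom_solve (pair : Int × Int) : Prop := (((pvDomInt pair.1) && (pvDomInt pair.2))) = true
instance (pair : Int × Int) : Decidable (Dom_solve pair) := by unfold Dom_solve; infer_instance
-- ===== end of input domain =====

-- B replaces A's magnitude-comparison loop by depth alignment via bit_length followed by
-- lockstep ascent; equivalence is proved on Pre_solve, exactly the inputs where A terminates.


-- ===== PORT A =====
-- A's while-loop: halve the larger node, count steps.  The fuel argument only makes the
-- recursion total; on Pre_solve inputs it is never exhausted (each step shrinks a+b).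
def solveLoopA (fuel : Nat) (a b r : Int) : Int :=
  match fuel with
  | 0 => r
  | f + 1 =>
    if a ≠ b then
      if a > b then solveLoopA f (PySem.Int.floordiv a 2) b (r + 1)
      else solveLoopA f a (PySem.Int.floordiv b 2) (r + 1)
    else r

def solve (pair : Int × Int) : Int :=
  solveLoopA (pair.1.natAbs + pair.2.natAbs + 1) pair.1 pair.2 0

-- ===== PORT B =====
-- 'for _ in range(k): x //= 2'
def halveN (k : Nat) (x : Int) : Int :=
  match k with
  | 0 => x
  | k + 1 => halveN k (PySem.Int.floordiv x 2)

-- B's lockstep while-loop (fuel only for totality, never exhausted on Pre_solve inputs)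
def lockstep (fuel : Nat) (a b r : Int) : Int :=
  match fuel with
  | 0 => r
  | f + 1 =>
    if a ≠ b then
      lockstep f (PySem.Int.floordiv a 2) (PySem.Int.floordiv b 2) (r + 2)
    else r

def solve_alt (pair : Int × Int) : Int :=
  let a := pair.1
  let b := pair.2
  let da := PySem.Int.bitLength a
  let db := PySem.Int.bitLength b
  let a2 := halveN (da - db) a
  let b2 := halveN (db - da) b
  lockstep (a2.natAbs + b2.natAbs + 1) a2 b2 |(da : Int) - (db : Int)|

-- ===== PRECONDITION & SPEC =====
-- Pre_solve is exactly the set of inputs on which the Python A terminates: with a negative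
-- component and a ≠ b, A's while-loop never exits (floor division gets stuck at -1 or 0).
def Pre_solve (pair : Int × Int) : Prop :=
  (0 ≤ pair.1 ∧ 0 ≤ pair.2) ∨ pair.1 = pair.2
instance (pair : Int × Int) : Decidable (Pre_solve pair) := by unfold Pre_solve; infer_instance
def pvWitness_solve : (Int × Int) := (6, 5)
def Spec_solve (pair : Int × Int) (out : Int) : Prop := out = solve_alt pair
instance (pair : Int × Int) (out : Int) : Decidable (Spec_solve pair out) := by unfold Spec_solve; infer_instance

-- ===== CLAIM (what is proved, stated in full; the proofs are below) =====
def Claim_equal_solve : Prop := ∀ (pair : Int × Int), Dom_solve pair → Pre_solve pair → Spec_solve pair (solve pair)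

-- ===== LEMMAS AND PROOFS =====

-- reference distance on naturals
def pdist (a b : Nat) : Nat :=
  if a = b then 0
  else if b < a then pdist (a / 2) b + 1
  else pdist a (b / 2) + 1
termination_by a + b
decreasing_by
  · have : a / 2 < a := Nat.div_lt_self (by omega) (by norm_num)
    omega
  · have : b / 2 < b := Nat.div_lt_self (by omega) (by norm_num)
    omega

def halveNat (k a : Nat) : Nat :=
  match k with
  | 0 => a
  | k + 1 => halveNat k (a / 2)

-- bit length on naturals, via the PySem primitive
def bl (n : Nat) : Nat := PySem.Int.bitLength (n : Int)

-- bitLengthAux is fuel-insensitive once fuel exceeds the argument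
theorem aux_irrel (n : Nat) : ∀ f g, n < f → n < g →
    PySem.Int.bitLengthAux f n = PySem.Int.bitLengthAux g n := by
  induction n using Nat.strong_induction_on with
  | _ n ih =>
    intro f g hf hg
    match f, g with
    | f + 1, g + 1 =>
      by_cases h0 : n = 0
      · simp [PySem.Int.bitLengthAux, h0]
      · have hlt : n / 2 < n := Nat.div_lt_self (by omega) (by norm_num)
        simp only [PySem.Int.bitLengthAux, h0, if_false]
        rw [ih (n / 2) hlt f g (by omega) (by omega)]

theorem bl_zero : bl 0 = 0 := by decide

theorem bl_succ (n : Nat) (h : 1 ≤ n) : bl n = bl (n / 2) + 1 := by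
  have hlt : n / 2 < n := Nat.div_lt_self (by omega) (by norm_num)
  unfold bl PySem.Int.bitLength
  simp only [Int.natAbs_natCast]
  have h0 : ¬ n = 0 := by omega
  have h1 : PySem.Int.bitLengthAux (n + 1) n = PySem.Int.bitLengthAux n (n / 2) + 1 := by
    simp [PySem.Int.bitLengthAux, h0]
  rw [h1, aux_irrel (n / 2) n (n / 2 + 1) (by omega) (by omega)]

theorem bl_pos (n : Nat) (h : 1 ≤ n) : 1 ≤ bl n := by
  rw [bl_succ n h]; omega

theorem bl_bounds (n : Nat) (h : 1 ≤ n) : 2 ^ (bl n - 1) ≤ n ∧ n < 2 ^ (bl n) := by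
  induction n using Nat.strong_induction_on with
  | _ n ih =>
    by_cases h1 : n = 1
    · subst h1
      have : bl 1 = 1 := by rw [bl_succ 1 (by omega)]; norm_num [bl_zero]
      simp [this]
    · have h2 : 2 ≤ n := by omega
      have hm : 1 ≤ n / 2 := by omega
      have hlt : n / 2 < n := Nat.div_lt_self (by omega) (by norm_num)
      obtain ⟨hlo, hhi⟩ := ih (n / 2) hlt hm
      have hbm := bl_pos (n / 2) hm
      obtain ⟨k, hk⟩ : ∃ k, bl (n / 2) = k + 1 := ⟨bl (n / 2) - 1, by omega⟩
      rw [bl_succ n (by omega), hk]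
      rw [hk] at hlo hhi
      simp only [Nat.add_sub_cancel] at hlo ⊢
      have e1 : 2 ^ (k + 1) = 2 * 2 ^ k := by ring
      have e2 : 2 ^ (k + 2) = 2 * 2 ^ (k + 1) := by ring
      omega

theorem bl_lt_pow (n : Nat) : n < 2 ^ (bl n) := by
  by_cases h : n = 0
  · simp [h, bl_zero]
  · exact (bl_bounds n (by omega)).2

theorem bl_mono (x y : Nat) (h : bl x < bl y) : x < y := by
  have hy : 1 ≤ y := by
    by_contra hy
    have : y = 0 := by omega
    rw [this, bl_zero] at h; omega
  have h1 := bl_lt_pow x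
  have h2 := (bl_bounds y hy).1
  have h3 : 2 ^ (bl x) ≤ 2 ^ (bl y - 1) :=
    Nat.pow_le_pow_right (by norm_num) (by omega)
  omega

theorem pdist_self (a : Nat) : pdist a a = 0 := by rw [pdist]; simp

theorem pdist_gt (a b : Nat) (h : b < a) : pdist a b = pdist (a / 2) b + 1 := by
  rw [pdist]; rw [if_neg (by omega), if_pos h]

theorem pdist_lt (a b : Nat) (h : a < b) : pdist a b = pdist a (b / 2) + 1 := by
  rw [pdist]; rw [if_neg (by omega), if_neg (by omega)]

theorem pdist_comm (a b : Nat) : pdist a b = pdist b a := by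
  have key : ∀ n a b : Nat, a + b ≤ n → pdist a b = pdist b a := by
    intro n
    induction n with
    | zero =>
      intro a b h
      have ha : a = 0 := by omega
      have hb : b = 0 := by omega
      subst ha; subst hb; rfl
    | succ n ih =>
      intro a b h
      rcases Nat.lt_trichotomy a b with h' | h' | h'
      · have hb2 : b / 2 < b := Nat.div_lt_self (by omega) (by norm_num)
        rw [pdist_lt a b h', pdist_gt b a h', ih a (b / 2) (by omega)]
      · simp [h']
      · have ha2 : a / 2 < a := Nat.div_lt_self (by omega) (by norm_num)
        rw [pdist_gt a b h', pdist_lt b a h', ih (a / 2) b (by omega)]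
  exact key (a + b) a b le_rfl

theorem pdist_step (a b : Nat) (hne : a ≠ b) (hbl : bl a = bl b) :
    1 ≤ a ∧ 1 ≤ b ∧ pdist a b = pdist (a / 2) (b / 2) + 2 ∧ bl (a / 2) = bl (b / 2) := by
  have ha : 1 ≤ a := by
    by_contra ha
    have ha0 : a = 0 := by omega
    have hb : 1 ≤ b := by omega
    have := bl_pos b hb
    rw [ha0, bl_zero] at hbl; omega
  have hb : 1 ≤ b := by
    by_contra hb
    have hb0 : b = 0 := by omega
    have := bl_pos a ha
    rw [hb0, bl_zero] at hbl; omega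
  have hsa := bl_succ a ha
  have hsb := bl_succ b hb
  have hbl2 : bl (a / 2) = bl (b / 2) := by omega
  refine ⟨ha, hb, ?_, hbl2⟩
  rcases Nat.lt_or_ge b a with hlt | hge
  · have hstep : bl (a / 2) < bl b := by
      have := bl_pos b hb; omega
    have h2 : a / 2 < b := bl_mono _ _ hstep
    rw [pdist_gt a b hlt, pdist_lt (a / 2) b h2]
  · have hlt : a < b := by omega
    have hstep : bl (b / 2) < bl a := by
      have := bl_pos a ha; omega
    have h2 : b / 2 < a := bl_mono _ _ hstep
    rw [pdist_lt a b hlt, pdist_gt a (b / 2) h2]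

theorem align (k : Nat) : ∀ a b : Nat, bl a = bl b + k →
    pdist a b = pdist (halveNat k a) b + k ∧ bl (halveNat k a) = bl b := by
  induction k with
  | zero => intro a b h; simp [halveNat, h]
  | succ k ih =>
    intro a b h
    have ha : 1 ≤ a := by
      by_contra ha
      have : a = 0 := by omega
      rw [this, bl_zero] at h; omega
    have hba : b < a := by
      apply bl_mono; omega
    have hs := bl_succ a ha
    have hrec := ih (a / 2) b (by omega)
    have hh : halveNat (k + 1) a = halveNat k (a / 2) := rfl
    rw [hh, pdist_gt a b hba]
    omega

theorem halveN_cast (k : Nat) : ∀ a : Nat, halveN k (a : Int) = ((halveNat k a : Nat) : Int) := by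
  induction k with
  | zero => intro a; rfl
  | succ k ih =>
    intro a
    have hf : PySem.Int.floordiv (a : Int) 2 = ((a / 2 : Nat) : Int) := by
      exact_mod_cast PySem.Int.floordiv_natCast a 2
    simp only [halveN, halveNat, hf, ih]

theorem loopA_eq : ∀ fuel (a b : Nat) (r : Int), a + b < fuel →
    solveLoopA fuel (a : Int) (b : Int) r = r + (pdist a b : Int) := by
  intro fuel
  induction fuel with
  | zero => intro a b r h; omega
  | succ f ih =>
    intro a b r h
    by_cases hab : a = b
    · subst hab
      simp [solveLoopA, pdist_self]
    · have hfa : PySem.Int.floordiv (a : Int) 2 = ((a / 2 : Nat) : Int) := by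
        exact_mod_cast PySem.Int.floordiv_natCast a 2
      have hfb : PySem.Int.floordiv (b : Int) 2 = ((b / 2 : Nat) : Int) := by
        exact_mod_cast PySem.Int.floordiv_natCast b 2
      have hne : (a : Int) ≠ (b : Int) := by exact_mod_cast hab
      rcases Nat.lt_or_ge b a with hlt | hge
      · have hgt : (a : Int) > (b : Int) := by exact_mod_cast hlt
        have ha2 : a / 2 < a := Nat.div_lt_self (by omega) (by norm_num)
        rw [solveLoopA, if_pos hne, if_pos hgt, hfa,
          ih (a / 2) b (r + 1) (by omega), pdist_gt a b hlt]
        push_cast; ring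
      · have hlt : a < b := by omega
        have hngt : ¬ (a : Int) > (b : Int) := by exact_mod_cast not_lt.mpr (by omega : a ≤ b)
        have hb2 : b / 2 < b := Nat.div_lt_self (by omega) (by norm_num)
        rw [solveLoopA, if_pos hne, if_neg hngt, hfb,
          ih a (b / 2) (r + 1) (by omega), pdist_lt a b hlt]
        push_cast; ring

theorem lockstep_eq : ∀ fuel (a b : Nat) (r : Int), a + b < fuel → bl a = bl b →
    lockstep fuel (a : Int) (b : Int) r = r + (pdist a b : Int) := by
  intro fuel
  induction fuel with
  | zero => intro a b r h; omega
  | succ f ih =>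
    intro a b r h hbl
    by_cases hab : a = b
    · subst hab
      simp [lockstep, pdist_self]
    · obtain ⟨ha, hb, hd, hbl2⟩ := pdist_step a b hab hbl
      have hfa : PySem.Int.floordiv (a : Int) 2 = ((a / 2 : Nat) : Int) := by
        exact_mod_cast PySem.Int.floordiv_natCast a 2
      have hfb : PySem.Int.floordiv (b : Int) 2 = ((b / 2 : Nat) : Int) := by
        exact_mod_cast PySem.Int.floordiv_natCast b 2
      have hne : (a : Int) ≠ (b : Int) := by exact_mod_cast hab
      have ha2 : a / 2 < a := Nat.div_lt_self (by omega) (by norm_num)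
      have hb2 : b / 2 < b := Nat.div_lt_self (by omega) (by norm_num)
      rw [lockstep, if_pos hne, hfa, hfb,
        ih (a / 2) (b / 2) (r + 2) (by omega) hbl2, hd]
      push_cast; ring

theorem main_eq (a b : Nat) : solve ((a : Int), (b : Int)) = solve_alt ((a : Int), (b : Int)) := by
  have hL : solve ((a : Int), (b : Int)) = (pdist a b : Int) := by
    unfold solve
    simp only [Int.natAbs_natCast]
    rw [loopA_eq (a + b + 1) a b 0 (by omega)]
    ring
  rw [hL]
  unfold solve_alt
  simp only [show PySem.Int.bitLength ((a : Int), (b : Int)).1 = bl a from rfl,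
    show PySem.Int.bitLength ((a : Int), (b : Int)).2 = bl b from rfl]
  rcases Nat.lt_or_ge (bl a) (bl b) with h | h
  · set k := bl b - bl a with hk
    have hzero : bl a - bl b = 0 := by omega
    have halign := align k b a (by omega)
    rw [hzero, halveN_cast k b, show halveN 0 (a : Int) = (a : Int) from rfl]
    simp only [Int.natAbs_natCast]
    rw [lockstep_eq (a + halveNat k b + 1) a (halveNat k b) _ (by omega) halign.2.symm]
    have habs : |((bl a : Int)) - ((bl b : Int))| = (k : Int) := by
      rw [abs_of_nonpos (by omega)]
      omega
    rw [habs]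
    have h1 := halign.1
    rw [pdist_comm b a] at h1
    rw [pdist_comm (halveNat k b) a] at h1
    omega
  · set k := bl a - bl b with hk
    have hzero : bl b - bl a = 0 := by omega
    have halign := align k a b (by omega)
    rw [hzero, halveN_cast k a, show halveN 0 (b : Int) = (b : Int) from rfl]
    simp only [Int.natAbs_natCast]
    rw [lockstep_eq (halveNat k a + b + 1) (halveNat k a) b _ (by omega) halign.2]
    have habs : |((bl a : Int)) - ((bl b : Int))| = (k : Int) := by
      rw [abs_of_nonneg (by omega)]
      omega
    rw [habs]
    have h1 := halign.1
    omega

theorem solve_spec : Claim_equal_solve := by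
  intro pair hdom hpre
  unfold Spec_solve
  obtain ⟨x, y⟩ := pair
  rcases hpre with ⟨hx, hy⟩ | hxy
  · simp only at hx hy
    rw [← Int.toNat_of_nonneg hx, ← Int.toNat_of_nonneg hy]
    exact main_eq x.toNat y.toNat
  · simp only at hxy
    subst hxy
    have hA : solve (x, x) = 0 := by
      unfold solve solveLoopA
      simp
    have hB : solve_alt (x, x) = 0 := by
      unfold solve_alt
      simp [halveN, lockstep]
    rw [hA, hB]
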